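-- pv_equiv track=rewrite | github.com/guilhermebs/AOC2022 | day23.py | move_elves
-- ===== SOURCE A (Python) =====
-- from collections import Counter
--
-- def move_elves(propose_moves):
--     new_positions = []
--     proposed_count = Counter(p[1] for p in propose_moves)
--     for elve, new_pos in propose_moves:
--         if proposed_count[new_pos] == 1:
--             new_positions.append(new_pos)
--         else:
--             new_positions.append(elve)
--
--     assert len(set(new_positions)) == len(propose_moves)
--     return set(new_positions)
-- ===== SOURCE B (Python) =====
-- def move_elves(propose_moves):
--     # One online pass with retroactive fix-up instead of Counter + second pass:
--     # tentatively emit each proposed position; on detecting a conflict, patch the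
--     # earlier proposer's slot back to its original position.
--     out = []
--     pending = {}  # pos -> (slot index, elf) of sole proposer so far; None once conflicted
--     for elve, pos in propose_moves:
--         if pos not in pending:
--             pending[pos] = (len(out), elve)
--             out.append(pos)
--         else:
--             p = pending[pos]
--             if p is not None:
--                 j, first_elve = p
--                 out[j] = first_elve
--                 pending[pos] = None
--             out.append(elve)
--     assert len(set(out)) == len(propose_moves)
--     return set(out)
-- ===== Notes on version B (the rewrite author's own statement) =====
-- stated objective: alternative
-- what changed: Replaces A's Counter-precomputation plus a second per-elf pass with a single online pass that tentatively emits each proposed position and retroactively patches the earlier proposer's output slot when a conflict is first detected, tracking pending sole proposers in a dict.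
import Mathlib
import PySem

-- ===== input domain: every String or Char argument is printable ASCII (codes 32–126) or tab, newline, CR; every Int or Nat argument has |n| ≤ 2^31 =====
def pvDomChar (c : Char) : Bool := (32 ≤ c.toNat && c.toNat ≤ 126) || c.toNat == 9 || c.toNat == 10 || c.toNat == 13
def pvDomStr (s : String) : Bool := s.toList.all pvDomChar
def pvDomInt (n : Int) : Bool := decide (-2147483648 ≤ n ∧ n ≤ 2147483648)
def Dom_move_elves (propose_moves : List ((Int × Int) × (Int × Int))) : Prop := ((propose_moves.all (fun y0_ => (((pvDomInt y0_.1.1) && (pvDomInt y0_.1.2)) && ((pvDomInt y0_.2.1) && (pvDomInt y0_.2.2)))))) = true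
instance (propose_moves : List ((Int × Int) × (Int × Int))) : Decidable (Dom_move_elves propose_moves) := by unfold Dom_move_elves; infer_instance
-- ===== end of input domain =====

-- B replaces A's Counter-then-second-pass with a single online pass that patches the
-- earlier proposer's slot on conflict (alternative decomposition, same O(n) cost).

-- ===== PORT A =====
def move_elves (propose_moves : List ((Int × Int) × (Int × Int))) : List (Int × Int) :=
  let proposed_count := PySem.Dict.counter (propose_moves.map (fun p => p.2))
  let new_positions := propose_moves.foldl
    (fun acc ep => if proposed_count.getD ep.2 0 = 1 then acc ++ [ep.2] else acc ++ [ep.1]) []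
  -- the Python `assert` raises exactly outside Pre_move_elves; the port returns the value
  PySem.Set.ofList new_positions

-- ===== PORT B =====
-- one loop step of Source B: state = (out, pending)
def bStep (st : List (Int × Int) × PySem.Dict (Int × Int) (Option (Nat × (Int × Int))))
    (ep : (Int × Int) × (Int × Int)) :
    List (Int × Int) × PySem.Dict (Int × Int) (Option (Nat × (Int × Int))) :=
  match st.2.get? ep.2 with
  | none => (st.1 ++ [ep.2], st.2.insert ep.2 (some (st.1.length, ep.1)))
  | some none => (st.1 ++ [ep.1], st.2)
  | some (some jf) =>
      -- `out[j] = first_elve`: exact, j is always a valid nonnegative index of out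
      (st.1.set jf.1 jf.2 ++ [ep.1], st.2.insert ep.2 none)

def move_elves_alt (propose_moves : List ((Int × Int) × (Int × Int))) : List (Int × Int) :=
  let st := propose_moves.foldl bStep ([], PySem.Dict.empty)
  -- the Python `assert` raises exactly outside Pre_move_elves; the port returns the value
  PySem.Set.ofList st.1

-- ===== PRECONDITION & SPEC =====
-- Pre_ excludes exactly the inputs on which A's (and B's) `assert` fails, i.e. where the
-- resolved positions (proposal if uniquely proposed, else the elf's old spot) collide:
-- both Pythons raise AssertionError there.
def Pre_move_elves (propose_moves : List ((Int × Int) × (Int × Int))) : Prop :=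
  (propose_moves.map (fun ep =>
    if (propose_moves.map Prod.snd).count ep.2 = 1 then ep.2 else ep.1)).Nodup

instance (propose_moves : List ((Int × Int) × (Int × Int))) : Decidable (Pre_move_elves propose_moves) := by
  unfold Pre_move_elves; infer_instance

def pvWitness_move_elves : (List ((Int × Int) × (Int × Int))) :=
  [((0, 0), (1, 0)), ((2, 0), (1, 0)), ((3, 3), (3, 2))]

def Spec_move_elves (propose_moves : List ((Int × Int) × (Int × Int))) (out : List (Int × Int)) : Prop := out = move_elves_alt propose_moves
instance (propose_moves : List ((Int × Int) × (Int × Int))) (out : List (Int × Int)) : Decidable (Spec_move_elves propose_moves out) := by unfold Spec_move_elves; infer_instance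

-- ===== CLAIM (what is proved, stated in full; the proofs are below) =====
def Claim_equal_move_elves : Prop := ∀ (propose_moves : List ((Int × Int) × (Int × Int))), Dom_move_elves propose_moves → Pre_move_elves propose_moves → Spec_move_elves propose_moves (move_elves propose_moves)

-- ===== LEMMAS AND PROOFS =====

-- the resolved value of elf `ep` relative to the whole proposal list
def pvF (pm : List ((Int × Int) × (Int × Int))) (ep : (Int × Int) × (Int × Int)) : Int × Int :=
  if (pm.map Prod.snd).count ep.2 = 1 then ep.2 else ep.1

def bState (pm : List ((Int × Int) × (Int × Int))) :
    List (Int × Int) × PySem.Dict (Int × Int) (Option (Nat × (Int × Int))) :=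
  pm.foldl bStep ([], PySem.Dict.empty)

-- what Source B's `pending` dict answers after processing `pm`
def pendSpec (pm : List ((Int × Int) × (Int × Int))) (p : Int × Int) :
    Option (Option (Nat × (Int × Int))) :=
  if (pm.map Prod.snd).count p = 0 then none
  else if (pm.map Prod.snd).count p = 1 then
    some (some ((pm.map Prod.snd).idxOf p,
      (pm.getD ((pm.map Prod.snd).idxOf p) (((0,0),(0,0)) : (Int × Int) × (Int × Int))).1))
  else some none

lemma move_elves_eq_map (pm : List ((Int × Int) × (Int × Int))) :
    move_elves pm = PySem.Set.ofList (pm.map (pvF pm)) := by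
  unfold move_elves
  have h1 : (fun (acc : List (Int × Int)) (ep : (Int × Int) × (Int × Int)) =>
      if (PySem.Dict.counter (pm.map (fun p => p.2))).getD ep.2 0 = 1 then acc ++ [ep.2] else acc ++ [ep.1])
      = fun acc ep => acc ++ [pvF pm ep] := by
    funext acc ep
    have h2 : (PySem.Dict.counter (pm.map (fun p => p.2))).getD ep.2 0 = ((pm.map Prod.snd).count ep.2 : Int) := by
      simp [PySem.Dict.getD_counter (pm.map (fun p => p.2)) ep.2]
    rw [h2, pvF]
    rcases Nat.decEq ((pm.map Prod.snd).count ep.2) 1 with h | h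
    · simp [h]
    · simp [h]
  show PySem.Set.ofList (pm.foldl (fun acc ep =>
      if (PySem.Dict.counter (pm.map (fun p => p.2))).getD ep.2 0 = 1
      then acc ++ [ep.2] else acc ++ [ep.1]) []) = _
  rw [h1, PySem.List.foldl_append_singleton_eq_map]
  simp

lemma unique_of_count_one {α : Type} [BEq α] [LawfulBEq α] {l : List α} {q : α}
    (h : l.count q = 1) {i : Nat} (hi : i < l.length) (he : l[i] = q) : i = l.idxOf q := by
  induction l generalizing i with
  | nil => simp at hi
  | cons a t ih =>
    rcases i with _ | i
    · have ha : a = q := by simpa using he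
      simp [ha]
    · have hi' : i < t.length := by simpa using hi
      have he' : t[i] = q := by simpa using he
      by_cases ha : a = q
      · exfalso
        have hc0 : t.count q = 0 := by
          have := List.count_cons (a := q) (b := a) (l := t)
          rw [List.count_cons] at h
          simp [ha] at h
          omega
        exact (List.count_eq_zero.mp hc0) (he' ▸ List.getElem_mem hi')
      · have hc : t.count q = 1 := by
          rw [List.count_cons] at h
          simp [ha] at h
          exact h
        have := ih hc hi' he'
        simp [ha]
        omega

lemma count_append_snd (pre : List ((Int × Int) × (Int × Int))) (ep : (Int × Int) × (Int × Int)) (p : Int × Int) :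
    ((pre ++ [ep]).map Prod.snd).count p = (pre.map Prod.snd).count p + (if ep.2 = p then 1 else 0) := by
  simp [List.count_append, List.count_singleton]

lemma count_append_snd_self (pre : List ((Int × Int) × (Int × Int))) (ep : (Int × Int) × (Int × Int)) :
    ((pre ++ [ep]).map Prod.snd).count ep.2 = (pre.map Prod.snd).count ep.2 + 1 := by
  rw [count_append_snd, if_pos rfl]

lemma count_append_snd_ne (pre : List ((Int × Int) × (Int × Int))) (ep : (Int × Int) × (Int × Int))
    {p : Int × Int} (hp : p ≠ ep.2) :
    ((pre ++ [ep]).map Prod.snd).count p = (pre.map Prod.snd).count p := by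
  rw [count_append_snd, if_neg (fun h => hp h.symm), Nat.add_zero]

lemma pendSpec_append_of_ne (pre : List ((Int × Int) × (Int × Int))) (ep : (Int × Int) × (Int × Int))
    {p : Int × Int} (hp : p ≠ ep.2) : pendSpec (pre ++ [ep]) p = pendSpec pre p := by
  unfold pendSpec
  rw [count_append_snd_ne pre ep hp]
  by_cases h0 : (pre.map Prod.snd).count p = 0
  · rw [if_pos h0, if_pos h0]
  · rw [if_neg h0, if_neg h0]
    by_cases h1 : (pre.map Prod.snd).count p = 1
    · rw [if_pos h1, if_pos h1]
      have hmem : p ∈ pre.map Prod.snd := by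
        rw [← List.count_pos_iff]; omega
      have hidx : ((pre ++ [ep]).map Prod.snd).idxOf p = (pre.map Prod.snd).idxOf p := by
        rw [List.map_append]
        simp [List.idxOf_append, hmem]
      have hlt : (pre.map Prod.snd).idxOf p < pre.length := by
        have := List.idxOf_lt_length_of_mem hmem
        simpa using this
      rw [hidx, List.getD_append _ _ _ _ hlt]
    · rw [if_neg h1, if_neg h1]

lemma bInv (pm : List ((Int × Int) × (Int × Int))) :
    (bState pm).1 = pm.map (pvF pm) ∧
    ∀ p : Int × Int, (bState pm).2.get? p = pendSpec pm p := by
  induction pm using List.reverseRecOn with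
  | nil => constructor <;> simp [bState, pendSpec, PySem.Dict.get?_empty]
  | append_singleton pre ep ih =>
    obtain ⟨ih1, ih2⟩ := ih
    have hstep : bState (pre ++ [ep]) = bStep (bState pre) ep := by
      simp [bState, List.foldl_append]
    have hlen1 : (bState pre).1.length = pre.length := by rw [ih1]; simp
    have hg : ∀ e : (Int × Int) × (Int × Int), e.2 ≠ ep.2 → pvF (pre ++ [ep]) e = pvF pre e := by
      intro e hne
      unfold pvF
      rw [count_append_snd_ne pre ep hne]
    by_cases h0 : (pre.map Prod.snd).count ep.2 = 0
    · -- first proposer of this position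
      have hget : (bState pre).2.get? ep.2 = none := by
        rw [ih2]; unfold pendSpec; rw [if_pos h0]
      have hnotmem : ep.2 ∉ pre.map Prod.snd := List.count_eq_zero.mp h0
      rw [hstep]
      simp only [bStep, hget]
      constructor
      · rw [ih1, List.map_append]
        congr 1
        · apply List.map_congr_left
          intro e he
          have hne : e.2 ≠ ep.2 := fun h => hnotmem (h ▸ List.mem_map_of_mem he)
          exact (hg e hne).symm
        · have : pvF (pre ++ [ep]) ep = ep.2 := by
            unfold pvF
            rw [count_append_snd_self, h0]
            norm_num
          simp [this]
      · intro p
        by_cases hp : p = ep.2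
        · subst hp
          rw [PySem.Dict.get?_insert_self]
          have hc : ((pre ++ [ep]).map Prod.snd).count ep.2 = 1 := by
            rw [count_append_snd_self, h0]
          have hidx : ((pre ++ [ep]).map Prod.snd).idxOf ep.2 = pre.length := by
            rw [List.map_append]
            rw [List.idxOf_append, if_neg hnotmem]
            simp
          unfold pendSpec
          rw [hc, hidx]
          simp [hlen1]
        · rw [PySem.Dict.get?_insert_of_ne _ _ hp, ih2,
            pendSpec_append_of_ne pre ep hp]
    · by_cases h1 : (pre.map Prod.snd).count ep.2 = 1
      · -- exactly one earlier proposer: patch its slot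
        have hmem : ep.2 ∈ pre.map Prod.snd := by rw [← List.count_pos_iff]; omega
        have hjlt : (pre.map Prod.snd).idxOf ep.2 < pre.length := by
          have := List.idxOf_lt_length_of_mem hmem
          simpa using this
        have hget : (bState pre).2.get? ep.2 =
            some (some ((pre.map Prod.snd).idxOf ep.2,
              (pre.getD ((pre.map Prod.snd).idxOf ep.2) (((0,0),(0,0)))).1)) := by
          rw [ih2]; unfold pendSpec; rw [if_neg h0, if_pos h1]
        rw [hstep]
        simp only [bStep, hget]
        have hcnew : ((pre ++ [ep]).map Prod.snd).count ep.2 = 2 := by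
          rw [count_append_snd_self, h1]
        constructor
        · rw [ih1, List.map_append]
          congr 1
          · apply List.ext_getElem (by simp)
            intro i hi1 hi2
            have hi : i < pre.length := by simpa using hi2
            rw [List.getElem_set, List.getElem_map, List.getElem_map]
            by_cases hij : (pre.map Prod.snd).idxOf ep.2 = i
            · subst hij
              have hsnd : pre[(pre.map Prod.snd).idxOf ep.2].2 = ep.2 := by
                have h' := List.getElem_idxOf (x := ep.2) (xs := pre.map Prod.snd)
                  (by simpa using hjlt)
                rw [List.getElem_map] at h'
                exact h'
              rw [if_pos rfl]
              have hval : pvF (pre ++ [ep]) pre[(pre.map Prod.snd).idxOf ep.2] =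
                  pre[(pre.map Prod.snd).idxOf ep.2].1 := by
                unfold pvF
                rw [hsnd, hcnew]
                norm_num
              rw [hval, List.getD_eq_getElem _ _ hjlt]
            · rw [if_neg hij]
              have hsnd : pre[i].2 ≠ ep.2 := by
                intro h
                apply hij
                have := unique_of_count_one (q := ep.2) (l := pre.map Prod.snd) h1 (i := i)
                  (by simpa using hi) (by simpa using h)
                omega
              exact (hg pre[i] hsnd).symm
          · have : pvF (pre ++ [ep]) ep = ep.1 := by
              unfold pvF
              rw [hcnew]
              norm_num
            simp [this]
        · intro p
          by_cases hp : p = ep.2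
          · subst hp
            rw [PySem.Dict.get?_insert_self]
            unfold pendSpec
            rw [hcnew]
            norm_num
          · rw [PySem.Dict.get?_insert_of_ne _ _ hp, ih2,
              pendSpec_append_of_ne pre ep hp]
      · -- already conflicted
        have hget : (bState pre).2.get? ep.2 = some none := by
          rw [ih2]; unfold pendSpec; rw [if_neg h0, if_neg h1]
        rw [hstep]
        simp only [bStep, hget]
        have hcnew : ((pre ++ [ep]).map Prod.snd).count ep.2 =
            (pre.map Prod.snd).count ep.2 + 1 := count_append_snd_self pre ep
        constructor
        · rw [ih1, List.map_append]
          congr 1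
          · apply List.map_congr_left
            intro e he
            by_cases hsnd : e.2 = ep.2
            · unfold pvF
              rw [hsnd, hcnew, if_neg h1, if_neg (by omega)]
            · exact (hg e hsnd).symm
          · have : pvF (pre ++ [ep]) ep = ep.1 := by
              unfold pvF
              rw [hcnew, if_neg (by omega)]
            simp [this]
        · intro p
          by_cases hp : p = ep.2
          · subst hp
            rw [ih2]
            unfold pendSpec
            rw [hcnew, if_neg h0, if_neg h1, if_neg (by omega), if_neg (by omega)]
          · rw [ih2, pendSpec_append_of_ne pre ep hp]

-- ===== VERDICT (by name: the statement is the Claim_ definition above) =====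
theorem move_elves_spec : Claim_equal_move_elves := by
  intro pm _ _
  unfold Spec_move_elves
  have hB : move_elves_alt pm = PySem.Set.ofList (bState pm).1 := rfl
  rw [move_elves_eq_map, hB, (bInv pm).1]
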